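-- pv_equiv track=rewrite | github.com/madhurimarawat/CodeCulture-Daily | 06-10-2024/Solution.py | assign_medals
-- ===== SOURCE A (Python) =====
-- def assign_medals(scores):
--     """
--     This function takes a list of athlete scores as input and returns a list where:
--     - The athlete with the highest score receives the "Gold Medal"
--     - The athlete with the second-highest score receives the "Silver Medal"
--     - The athlete with the third-highest score receives the "Bronze Medal"
--     - Remaining athletes are assigned their ranks based on their score order.
--
--     :param scores: List[int] - A list of scores for the athletes.
--     :return: List[str] - A list with medals for the top 3 and ranks for the rest.
--     """
--
--     # Check if the input list is empty
--     if not scores: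
--         return []
--
--     # Finding sorted indices of the scores list in descending order of their scores
--     sorted_indexes = sorted(range(len(scores)), key=lambda x: scores[x], reverse=True)
--
--     # Initializing an empty list to store the results
--     result = [None] * len(scores)
--
--     # Assigning medals to the top 3 athletes
--     for i, idx in enumerate(sorted_indexes):
--         if i == 0:
--             result[idx] = "Gold Medal"
--         elif i == 1:
--             result[idx] = "Silver Medal"
--         elif i == 2:
--             result[idx] = "Bronze Medal"
--         else:
--             result[idx] = str(i + 1)  # For the rest, assign their ranks as string
--
--     return result
-- ===== SOURCE B (Python) =====
-- def assign_medals(scores):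
--     """
--     Rank-by-counting re-implementation: for each athlete i, its rank is the
--     number of athletes that come before it in a stable descending order,
--     i.e. those with a strictly higher score plus the equal-scored ones at
--     earlier indices. No sorting, no scatter into a preallocated list.
--     """
--     n = len(scores)
--     result = []
--     for i in range(n):
--         rank = 0
--         for j in range(n):
--             if scores[j] > scores[i] or (scores[j] == scores[i] and j < i):
--                 rank += 1
--         if rank == 0:
--             result.append("Gold Medal")
--         elif rank == 1:
--             result.append("Silver Medal")
--         elif rank == 2:
--             result.append("Bronze Medal")
--         else:
--             result.append(str(rank + 1))
--     return result
-- ===== Notes on version B (the rewrite author's own statement) =====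
-- stated objective: alternative
-- what changed: Replaced A's stable descending index sort plus scatter-assignment into a preallocated result list by a direct per-index rank computation (count of strictly higher scores plus equal scores at earlier indices), building the result in one forward pass.
import Mathlib
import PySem

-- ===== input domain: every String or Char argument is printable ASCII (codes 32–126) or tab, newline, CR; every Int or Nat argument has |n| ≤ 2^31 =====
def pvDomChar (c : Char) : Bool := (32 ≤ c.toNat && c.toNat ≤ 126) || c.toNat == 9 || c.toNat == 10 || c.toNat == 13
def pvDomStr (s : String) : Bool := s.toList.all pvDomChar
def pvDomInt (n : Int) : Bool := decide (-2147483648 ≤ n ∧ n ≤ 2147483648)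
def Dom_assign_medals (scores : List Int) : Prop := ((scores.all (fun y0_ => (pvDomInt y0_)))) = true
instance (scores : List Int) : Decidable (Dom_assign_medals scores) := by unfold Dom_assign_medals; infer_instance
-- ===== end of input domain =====

-- B replaces A's stable descending index-sort + scatter into a preallocated list by a direct
-- per-index rank count (strictly-higher scores plus equal scores at earlier indices); same cost
-- class in practice, different algorithm (objective: alternative).

-- ===== PORT A =====
-- label for the i-th entry (0-based) of the sorted index list
def pvMedalA (i : Nat) : String :=
  if i = 0 then "Gold Medal"
  else if i = 1 then "Silver Medal"
  else if i = 2 then "Bronze Medal"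
  else PySem.Int.toStr ((i : Int) + 1)

-- 'for i, idx in enumerate(sorted_indexes): result[idx] = …' ; idx ∈ range(len(scores)) is
-- always a valid non-negative index, so 'result[idx] =' is exactly List.set idx.toNat
def pvFillA (res : List String) (i : Nat) : List Int → List String
  | [] => res
  | idx :: rest => pvFillA (res.set idx.toNat (pvMedalA i)) (i + 1) rest

def assign_medals (scores : List Int) : List String :=
  if scores = [] then []
  else
    let sortedIndexes :=
      PySem.List.sorted (PySem.List.pyRange 0 (scores.length : Int))
        (fun x => PySem.List.pyGetD scores x 0) true
    -- result = [None] * len(scores): every slot is overwritten (sortedIndexes is a permutation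
    -- of 0..n-1), so the placeholder "" never reaches the output
    pvFillA (List.replicate scores.length "") 0 sortedIndexes

-- ===== PORT B =====
def pvRankB (scores : List Int) (i : Int) : Int :=
  (PySem.List.pyRange 0 (scores.length : Int)).foldl
    (fun rank j =>
      if PySem.List.pyGetD scores j 0 > PySem.List.pyGetD scores i 0 ∨
         (PySem.List.pyGetD scores j 0 = PySem.List.pyGetD scores i 0 ∧ j < i)
      then rank + 1 else rank) 0

def pvLabelB (r : Int) : String :=
  if r = 0 then "Gold Medal"
  else if r = 1 then "Silver Medal"
  else if r = 2 then "Bronze Medal"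
  else PySem.Int.toStr (r + 1)

def assign_medals_alt (scores : List Int) : List String :=
  (PySem.List.pyRange 0 (scores.length : Int)).foldl
    (fun result i => result ++ [pvLabelB (pvRankB scores i)]) []

-- ===== PRECONDITION & SPEC =====
def Spec_assign_medals (scores : List Int) (out : List String) : Prop := out = assign_medals_alt scores
instance (scores : List Int) (out : List String) : Decidable (Spec_assign_medals scores out) := by unfold Spec_assign_medals; infer_instance

-- ===== CLAIM (what is proved, stated in full; the proofs are below) =====
def Claim_equal_assign_medals : Prop := ∀ (scores : List Int), Dom_assign_medals scores → Spec_assign_medals scores (assign_medals scores)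

-- ===== LEMMAS AND PROOFS =====

-- the "comes strictly before in A's stable descending order" relation on indices
abbrev pvBefore (s : List Int) (a b : Int) : Prop :=
  PySem.List.pyGetD s b 0 < PySem.List.pyGetD s a 0 ∨
  (PySem.List.pyGetD s a 0 = PySem.List.pyGetD s b 0 ∧ a < b)

theorem pvBefore_irrefl (s : List Int) (a : Int) : ¬ pvBefore s a a := by
  simp [pvBefore]

theorem pvBefore_asymm (s : List Int) {a b : Int} (h : pvBefore s a b) : ¬ pvBefore s b a := by
  rcases h with h | ⟨h1, h2⟩ <;> rintro (h' | ⟨h1', h2'⟩) <;> omega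

theorem pvBefore_trans (s : List Int) {a b c : Int}
    (h1 : pvBefore s a b) (h2 : pvBefore s b c) : pvBefore s a c := by
  rcases h1 with h1 | ⟨h1, h1'⟩ <;> rcases h2 with h2 | ⟨h2, h2'⟩ <;> unfold pvBefore <;> omega

-- inserting a larger-index element into a stably ordered accumulator keeps it ordered
theorem pvIns (s : List Int) (x : Int) :
    ∀ acc : List Int, acc.Pairwise (pvBefore s) → (∀ a ∈ acc, a < x) →
      (PySem.List.insertBy
        (fun a b => decide (PySem.List.pyGetD s b 0 < PySem.List.pyGetD s a 0)) x acc).Pairwise (pvBefore s) ∧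
      (PySem.List.insertBy
        (fun a b => decide (PySem.List.pyGetD s b 0 < PySem.List.pyGetD s a 0)) x acc).Perm (x :: acc) := by
  intro acc
  induction acc with
  | nil => intro _ _; simp [PySem.List.insertBy]
  | cons y ys ih =>
    intro hpw hlt
    rw [List.pairwise_cons] at hpw
    simp only [PySem.List.insertBy]
    by_cases hk : PySem.List.pyGetD s y 0 < PySem.List.pyGetD s x 0
    · simp only [hk, decide_true, if_true]
      constructor
      · refine List.pairwise_cons.mpr ⟨?_, List.pairwise_cons.mpr hpw⟩
        intro z hz
        rcases List.mem_cons.mp hz with rfl | hz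
        · exact Or.inl hk
        · exact pvBefore_trans s (Or.inl hk) (hpw.1 z hz)
      · exact List.Perm.refl _
    · simp only [hk, decide_false]
      obtain ⟨ihpw, ihperm⟩ := ih hpw.2 (fun a ha => hlt a (List.mem_cons_of_mem _ ha))
      have hyx : pvBefore s y x := by
        have : y < x := hlt y (List.mem_cons_self ..)
        unfold pvBefore; omega
      refine ⟨List.pairwise_cons.mpr ⟨?_, ihpw⟩, ?_⟩
      · intro z hz
        rcases List.mem_cons.mp (ihperm.mem_iff.mp hz) with rfl | h
        · exact hyx
        · exact hpw.1 z h
      · exact (List.Perm.cons y ihperm).trans (List.Perm.swap x y ys)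

-- folding insertions of an increasing index list yields a stably ordered permutation
theorem pvFold (s : List Int) :
    ∀ (xs acc : List Int), acc.Pairwise (pvBefore s) → xs.Pairwise (· < ·) →
      (∀ a ∈ acc, ∀ x ∈ xs, a < x) →
      (xs.foldl (fun acc x =>
        PySem.List.insertBy
          (fun a b => decide (PySem.List.pyGetD s b 0 < PySem.List.pyGetD s a 0)) x acc) acc).Pairwise (pvBefore s) ∧
      (xs.foldl (fun acc x =>
        PySem.List.insertBy
          (fun a b => decide (PySem.List.pyGetD s b 0 < PySem.List.pyGetD s a 0)) x acc) acc).Perm (acc ++ xs) := by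
  intro xs
  induction xs with
  | nil => intro acc h _ _; simpa using h
  | cons x rest ih =>
    intro acc hacc hxs hcross
    rw [List.pairwise_cons] at hxs
    obtain ⟨hins, hperm⟩ := pvIns s x acc hacc (fun a ha => hcross a ha x (List.mem_cons_self ..))
    simp only [List.foldl_cons]
    obtain ⟨h1, h2⟩ := ih _ hins hxs.2 (by
      intro a ha y hy
      rcases List.mem_cons.mp (hperm.mem_iff.mp ha) with rfl | ha
      · exact hxs.1 y hy
      · exact hcross a ha y (List.mem_cons_of_mem _ hy))
    exact ⟨h1, h2.trans ((hperm.append_right rest).trans List.perm_middle.symm)⟩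

-- in a stably ordered duplicate-free list, an element's position is the number of
-- elements that come before it
theorem pvPos (s : List Int) :
    ∀ (L : List Int), L.Pairwise (pvBefore s) → ∀ i ∈ L,
      L.countP (fun j => decide (pvBefore s j i)) = L.idxOf i := by
  intro L
  induction L with
  | nil => intro _ i hi; simp at hi
  | cons a rest ih =>
    intro hpw i hi
    rw [List.pairwise_cons] at hpw
    by_cases hia : i = a
    · subst hia
      have h0 : rest.countP (fun j => decide (pvBefore s j i)) = 0 := by
        rw [List.countP_eq_zero]
        intro j hj
        simpa using pvBefore_asymm s (hpw.1 j hj)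
      rw [List.countP_cons_of_neg (by simp [pvBefore_irrefl s i]), h0,
        List.idxOf_cons_self]
    · have hirest : i ∈ rest := by
        rcases List.mem_cons.mp hi with h | h
        · exact absurd h hia
        · exact h
      have hai : pvBefore s a i := hpw.1 i hirest
      rw [List.countP_cons_of_pos (by simpa using hai),
        List.idxOf_cons_ne _ (by simpa using Ne.symm hia), ih hpw.2 i hirest]

theorem pvFillA_length (L : List Int) : ∀ (res : List String) (i : Nat),
    (pvFillA res i L).length = res.length := by
  induction L with
  | nil => intro res i; rfl
  | cons idx rest ih => intro res i; simp [pvFillA, ih]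

-- scatter characterisation: after the fill loop, slot q holds the label of i + (position of q)
theorem pvFillA_get (L : List Int) : ∀ (res : List String) (i : Nat) (q : Nat),
    L.Nodup → (∀ x ∈ L, 0 ≤ x) → q < res.length →
    (pvFillA res i L)[q]? =
      if (q : Int) ∈ L then some (pvMedalA (i + L.idxOf (q : Int))) else res[q]? := by
  induction L with
  | nil => intro res i q _ _ hq; simp [pvFillA]
  | cons idx rest ih =>
    intro res i q hnd hpos hq
    have hidx0 : 0 ≤ idx := hpos idx (List.mem_cons_self ..)
    rw [List.nodup_cons] at hnd
    simp only [pvFillA]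
    have hlen : q < (res.set idx.toNat (pvMedalA i)).length := by simpa using hq
    rw [ih _ (i + 1) q hnd.2 (fun x hx => hpos x (List.mem_cons_of_mem _ hx)) hlen]
    by_cases hqi : (q : Int) = idx
    · have hq' : q = idx.toNat := by omega
      have hnm : (q : Int) ∉ rest := hqi ▸ hnd.1
      rw [if_neg hnm, if_pos (by simp [hqi])]
      rw [hqi, List.idxOf_cons_self]
      simp [← hq', hq]
    · have hne' : idx.toNat ≠ q := by
        intro h
        apply hqi
        omega
      rw [List.getElem?_set_ne hne']
      by_cases hmem : (q : Int) ∈ rest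
      · rw [if_pos hmem, if_pos (List.mem_cons_of_mem _ hmem)]
        rw [List.idxOf_cons_ne _ (by simpa using fun h => hqi h.symm)]
        have harith : ∀ m : Nat, i + 1 + m = i + m.succ := fun m => by omega
        rw [harith]
      · rw [if_neg hmem, if_neg (by simp [hqi, hmem])]

theorem pvLabel_cast (m : Nat) : pvLabelB (m : Int) = pvMedalA m := by
  match m with
  | 0 => rfl
  | 1 => rfl
  | 2 => rfl
  | (k + 3) =>
    unfold pvLabelB pvMedalA
    rw [if_neg (by omega), if_neg (by omega), if_neg (by omega),
      if_neg (by omega), if_neg (by omega), if_neg (by omega)]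

theorem pvRankB_eq_countP (scores : List Int) (i : Int) :
    pvRankB scores i =
      ((PySem.List.pyRange 0 (scores.length : Int)).countP
        (fun j => decide (pvBefore scores j i)) : Int) := by
  unfold pvRankB
  rw [PySem.List.foldl_ite_add_one (p := fun j => pvBefore scores j i)]
  simp [pvBefore]

-- B as a map over the index range
theorem pvAlt_eq_map (scores : List Int) :
    assign_medals_alt scores =
      (List.range scores.length).map (fun (q : Nat) => pvLabelB (pvRankB scores (q : Int))) := by
  unfold assign_medals_alt
  rw [PySem.List.foldl_append_singleton_eq_map, PySem.List.pyRange_zero_natCast, List.map_map]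
  rfl

-- ===== VERDICT (by name: the statement is the Claim_ definition above) =====
theorem assign_medals_spec : Claim_equal_assign_medals := by
  intro scores _
  unfold Spec_assign_medals
  by_cases hnil : scores = []
  · subst hnil
    rfl
  · unfold assign_medals
    rw [if_neg hnil]
    set n := scores.length with hn
    set key : Int → Int := fun x => PySem.List.pyGetD scores x 0 with hkey
    set L := PySem.List.sorted (PySem.List.pyRange 0 (n : Int)) key true with hL
    have hperm : L.Perm (PySem.List.pyRange 0 (n : Int)) := PySem.List.sorted_perm _ _ _
    have hrange_pw : (PySem.List.pyRange 0 (n : Int)).Pairwise (· < ·) := by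
      rw [PySem.List.pyRange_zero_natCast]
      exact List.Pairwise.map _ (fun a b h => by exact_mod_cast h) List.pairwise_lt_range
    have hLpw : L.Pairwise (pvBefore scores) := by
      rw [hL, PySem.List.sorted_rev_eq_foldl_insertBy]
      exact (pvFold scores _ [] (by simp) hrange_pw (by simp)).1
    have hLnd : L.Nodup := hperm.nodup_iff.mpr (by
      rw [PySem.List.pyRange_zero_natCast]
      exact List.Nodup.map (fun a b h => by exact_mod_cast h) List.nodup_range)
    have hLpos : ∀ x ∈ L, 0 ≤ x := by
      intro x hx
      have := (PySem.List.mem_pyRange_one).mp (hperm.mem_iff.mp hx)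
      exact this.1
    rw [pvAlt_eq_map]
    have hAlen : (pvFillA (List.replicate n "") 0 L).length = n := by
      rw [pvFillA_length]; simp
    apply List.ext_getElem?
    intro q
    by_cases hq : q < n
    · have hmemL : (q : Int) ∈ L := by
        rw [hperm.mem_iff, PySem.List.mem_pyRange_one]
        constructor <;> omega
      rw [pvFillA_get L _ 0 q hLnd hLpos (by simp [hq]), if_pos hmemL]
      rw [List.getElem?_map, List.getElem?_range hq]
      simp only [Option.map_some]
      congr 1
      have hcnt : pvRankB scores (q : Int) = (L.idxOf (q : Int) : Int) := by
        rw [pvRankB_eq_countP, ← hperm.countP_eq, pvPos scores L hLpw _ hmemL]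
      rw [hcnt, pvLabel_cast, Nat.zero_add]
    · rw [List.getElem?_eq_none (by simpa [hAlen] using Nat.le_of_not_lt hq),
        List.getElem?_eq_none (by simpa using Nat.le_of_not_lt hq)]
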